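-- pv_equiv track=rewrite | github.com/Rubisk/Euler | euler_161.py | hash_board
-- ===== SOURCE A (Python) =====
-- def hash_board(board, n, m):
-- 	hash_key = 0
-- 	for j in range(m):
-- 		i = 0
-- 		while i < n and board[i * m + j] == 1:
-- 			i += 1
-- 		hash_key += i * n ** j
-- 	return hash_key
-- ===== SOURCE B (Python) =====
-- def hash_board(board, n, m):
--     size = len(board)
--     counts = [0] * m
--     alive = list(range(m))
--     i = 0
--     while i < n and alive:
--         base = i * m
--         alive = [j for j in alive if base + j < size and board[base + j] == 1]
--         for j in alive:
--             counts[j] = i + 1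
--         i += 1
--     key = 0
--     p = 1
--     for j in range(m):
--         key += counts[j] * p
--         p *= n
--     return key
-- ===== Notes on version B (the rewrite author's own statement) =====
-- stated objective: alternative
-- what changed: B replaces A's column-by-column scan (an inner while over rows per column plus an n**j power per column) by a single row-major pass that maintains a counts array and a shrinking list of still-alive columns, stopping early once every column has terminated, and then combines the counts with a running power accumulator instead of computing n**j.
import Mathlib
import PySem

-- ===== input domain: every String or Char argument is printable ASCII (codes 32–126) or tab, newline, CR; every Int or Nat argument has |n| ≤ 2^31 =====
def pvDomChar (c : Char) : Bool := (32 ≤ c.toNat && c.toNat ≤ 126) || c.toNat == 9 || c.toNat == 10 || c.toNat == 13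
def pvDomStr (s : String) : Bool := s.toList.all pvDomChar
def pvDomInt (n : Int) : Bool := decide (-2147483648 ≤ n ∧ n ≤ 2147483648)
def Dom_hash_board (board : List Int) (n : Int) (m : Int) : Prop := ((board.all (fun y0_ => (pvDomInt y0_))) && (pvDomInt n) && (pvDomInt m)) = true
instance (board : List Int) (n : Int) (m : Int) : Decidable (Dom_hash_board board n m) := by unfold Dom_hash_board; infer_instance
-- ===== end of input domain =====

-- B replaces A's column-by-column scan (a while over rows per column, plus n ** j per column) by a
-- single row-major pass that maintains a counts array and a shrinking list of still-alive columns,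
-- then combines the counts with a running power accumulator; equivalence proved on Pre_.

-- ===== PORT A =====
-- A's inner 'while i < n and board[i * m + j] == 1: i += 1'; the bound 'i < n' is encoded by the
-- structural countdown fuel, started at n.toNat so that fuel = (n - i).toNat at every call.
def hashWhileF : Nat → List Int → Int → Int → Int → Int
  | 0, _, _, _, i => i                 -- i = n: loop condition i < n fails
  | f + 1, board, m, j, i =>
      match PySem.List.pyGet? board (i * m + j) with
      | some v => if v = 1 then hashWhileF f board m j (i + 1) else i
      | none => i                      -- Python raises IndexError here; Pre_hash_board excludes exactly these inputs

def hash_board (board : List Int) (n : Int) (m : Int) : Int :=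
  (PySem.List.pyRange 0 m 1).foldl
    (fun hash_key j => hash_key + hashWhileF n.toNat board m j 0 * n ^ j.toNat) 0

-- ===== PORT B =====
-- the comprehension's test 'base + j < size and board[base + j] == 1' (base = i*m)
def altPred (board : List Int) (m : Int) (i : Int) (j : Int) : Bool :=
  decide (i * m + j < (board.length : Int) ∧ PySem.List.pyGet? board (i * m + j) = some 1)

-- B's 'while i < n and alive:' loop over rows; fuel = (n - i).toNat, started at n.toNat.
-- State is (counts, alive); each round filters alive and sets counts[j] = i + 1 for survivors.
def altRowLoop : Nat → List Int → Int → List Int × List Int → Int → List Int × List Int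
  | 0, _, _, st, _ => st               -- i = n
  | f + 1, board, m, st, i =>
      if st.2 = [] then st             -- alive empty: loop exits
      else
        let alive' := st.2.filter (altPred board m i)
        let counts' := alive'.foldl (fun cs j => cs.set j.toNat (i + 1)) st.1
        altRowLoop f board m (counts', alive') (i + 1)

def hash_board_alt (board : List Int) (n : Int) (m : Int) : Int :=
  let counts0 : List Int := List.replicate m.toNat 0      -- [0] * m
  let st := altRowLoop n.toNat board m (counts0, PySem.List.pyRange 0 m 1) 0
  -- final loop: key += counts[j] * p; p *= n   (counts[j] is always in range: 0 ≤ j < m = len counts)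
  ((PySem.List.pyRange 0 m 1).foldl
      (fun kp j => (kp.1 + PySem.List.pyGetD st.1 j 0 * kp.2, kp.2 * n)) ((0 : Int), (1 : Int))).1

-- ===== PRECONDITION & SPEC =====
-- Pre_ excludes exactly the inputs on which A raises IndexError (a column of 1s runs past the end
-- of the board before reaching n): for each column j, if the first out-of-range row i0 comes before
-- n, some earlier cell of the column must differ from 1 so that the scan stops in range.
def Pre_hash_board (board : List Int) (n : Int) (m : Int) : Prop :=
  n ≤ 0 ∨ (m ≤ (board.length : Int) ∧
    ∀ j ∈ PySem.List.pyRange 0 m 1,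
      max 0 (PySem.Int.floordiv ((board.length : Int) - j + m - 1) m) < n →
        ∃ k ∈ PySem.List.pyRange 0 (max 0 (PySem.Int.floordiv ((board.length : Int) - j + m - 1) m)) 1,
          PySem.List.pyGet? board (k * m + j) ≠ some 1)
instance (board : List Int) (n : Int) (m : Int) : Decidable (Pre_hash_board board n m) := by
  unfold Pre_hash_board; infer_instance

def pvWitness_hash_board : List Int × Int × Int := ([1, 0, 1, 1], 2, 2)

def Spec_hash_board (board : List Int) (n : Int) (m : Int) (out : Int) : Prop := out = hash_board_alt board n m
instance (board : List Int) (n : Int) (m : Int) (out : Int) : Decidable (Spec_hash_board board n m out) := by unfold Spec_hash_board; infer_instance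

-- ===== CLAIM (what is proved, stated in full; the proofs are below) =====
def Claim_equal_hash_board : Prop := ∀ (board : List Int) (n : Int) (m : Int), Dom_hash_board board n m → Pre_hash_board board n m → Spec_hash_board board n m (hash_board board n m)

-- ===== LEMMAS AND PROOFS =====

-- A's while loop never advances past its fuel
lemma hashWhileF_le (board : List Int) (m j : Int) :
    ∀ (f : Nat) (c : Int), hashWhileF f board m j c ≤ c + f := by
  intro f
  induction f with
  | zero => intro c; simp [hashWhileF]
  | succ f ih =>
    intro c
    cases h : PySem.List.pyGet? board (c * m + j) with
    | none => simp only [hashWhileF, h]; omega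
    | some v =>
      simp only [hashWhileF, h]
      by_cases hv : v = 1
      · rw [if_pos hv]
        have := ih (c + 1)
        omega
      · rw [if_neg hv]; omega

-- one more unit of fuel extends the count by one exactly when the scan is still running and
-- the next cell is an in-range 1 (the same test B's comprehension performs)
lemma hashWhileF_succ (board : List Int) (m j : Int) (hm : 0 ≤ m) (hj : 0 ≤ j) :
    ∀ (f : Nat) (c : Int), 0 ≤ c →
      hashWhileF (f + 1) board m j c =
        if altPred board m (c + f) j = true ∧ hashWhileF f board m j c = c + f
        then c + f + 1 else hashWhileF f board m j c := by
  intro f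
  induction f with
  | zero =>
    intro c hc
    have hidx : 0 ≤ c * m + j := by positivity
    simp only [Nat.cast_zero, add_zero]
    cases h : PySem.List.pyGet? board (c * m + j) with
    | none =>
      simp only [hashWhileF, h]
      rw [if_neg]
      rintro ⟨hp, -⟩
      simp [altPred, h] at hp
    | some v =>
      simp only [hashWhileF, h]
      by_cases hv : v = 1
      · have hlen : c * m + j < (board.length : Int) := by
          have h2 : (c * m + j) = (((c * m + j).toNat : Nat) : Int) := by omega
          rw [h2, PySem.List.pyGet?_natCast] at h
          have := (List.getElem?_eq_some_iff.mp h).1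
          omega
        rw [if_pos hv, if_pos]
        refine ⟨?_, trivial⟩
        simp only [altPred, decide_eq_true_eq]
        exact ⟨hlen, by rw [h, hv]⟩
      · rw [if_neg hv, if_neg]
        rintro ⟨hp, -⟩
        simp only [altPred, decide_eq_true_eq, h, Option.some.injEq] at hp
        exact hv hp.2
  | succ f ih =>
    intro c hc
    cases h : PySem.List.pyGet? board (c * m + j) with
    | none =>
      have hstop : hashWhileF (f + 1) board m j c = c := by
        simp only [hashWhileF, h]
      have hstop2 : hashWhileF (f + 1 + 1) board m j c = c := by
        simp only [hashWhileF, h]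
      rw [hstop, hstop2, if_neg]
      rintro ⟨-, habs⟩
      omega
    | some v =>
      by_cases hv : v = 1
      · have hrec : hashWhileF (f + 1 + 1) board m j c = hashWhileF (f + 1) board m j (c + 1) := by
          simp only [hashWhileF, h, if_pos hv]
        have hrec' : hashWhileF (f + 1) board m j c = hashWhileF f board m j (c + 1) := by
          simp only [hashWhileF, h, if_pos hv]
        rw [hrec, hrec', ih (c + 1) (by omega)]
        have hcast : c + 1 + (f : Int) = c + ((f : Nat) + 1 : Nat) := by push_cast; ring
        first
          | rfl
          | rw [hcast]
      · have hstop : ∀ g : Nat, hashWhileF (g + 1) board m j c = c := by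
          intro g; simp only [hashWhileF, h, if_neg hv]
        rw [hstop (f + 1), hstop f, if_neg]
        rintro ⟨-, habs⟩
        omega

-- once the scan has stopped short of its fuel, more fuel changes nothing
lemma hashWhileF_stable (board : List Int) (m j : Int) :
    ∀ (f g : Nat) (c : Int), hashWhileF f board m j c ≠ c + f →
      hashWhileF (f + g) board m j c = hashWhileF f board m j c := by
  intro f
  induction f with
  | zero => intro g c h; exact absurd (by simp [hashWhileF]) h
  | succ f ih =>
    intro g c h
    have hsum : f + 1 + g = (f + g) + 1 := by omega
    rw [hsum]
    cases hg : PySem.List.pyGet? board (c * m + j) with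
    | none => simp only [hashWhileF, hg]
    | some v =>
      by_cases hv : v = 1
      · simp only [hashWhileF, hg, if_pos hv]
        apply ih
        intro habs
        apply h
        have hr : hashWhileF (f + 1) board m j c = hashWhileF f board m j (c + 1) := by
          simp only [hashWhileF, hg, if_pos hv]
        rw [hr, habs]
        push_cast
        ring
      · simp only [hashWhileF, hg, if_neg hv]

-- length through B's 'for j in alive: counts[j] = i + 1'
lemma foldl_set_length (v : Int) :
    ∀ (l : List Int) (cs : List Int),
      (l.foldl (fun cs j => cs.set j.toNat v) cs).length = cs.length := by
  intro l
  induction l with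
  | nil => intro cs; rfl
  | cons j rest ih => intro cs; rw [List.foldl_cons, ih, List.length_set]

-- lookup through B's 'for j in alive: counts[j] = i + 1'
lemma foldl_set_get (v : Int) :
    ∀ (l : List Int) (cs : List Int) (k : Nat),
      (l.foldl (fun cs j => cs.set j.toNat v) cs)[k]? =
        if k ∈ l.map Int.toNat then (if k < cs.length then some v else none) else cs[k]? := by
  intro l
  induction l with
  | nil => intro cs k; simp
  | cons j rest ih =>
    intro cs k
    rw [List.foldl_cons, ih]
    simp only [List.map_cons, List.mem_cons, List.length_set, List.getElem?_set]
    by_cases hk : k ∈ rest.map Int.toNat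
    · rw [if_pos hk, if_pos (Or.inr hk)]
    · rw [if_neg hk]
      by_cases hjk : j.toNat = k
      · rw [if_pos hjk, if_pos (Or.inl hjk.symm), hjk]
      · rw [if_neg hjk, if_neg (by tauto)]

-- the row loop's invariant: counts[k] is always A's per-column count with fuel = rows seen so far,
-- and alive is exactly the set of columns whose count still equals that fuel
lemma rowLoop_inv (board : List Int) (m : Int) :
    ∀ (f i : Nat) (counts alive : List Int),
      counts.length = m.toNat →
      (∀ k : Nat, k < m.toNat → counts[k]? = some (hashWhileF i board m (k : Int) 0)) →
      alive = (PySem.List.pyRange 0 m 1).filter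
        (fun j => decide (hashWhileF i board m j 0 = (i : Int))) →
      ∀ k : Nat, k < m.toNat →
        (altRowLoop f board m (counts, alive) (i : Int)).1[k]? =
          some (hashWhileF (i + f) board m (k : Int) 0) := by
  intro f
  induction f with
  | zero => intro i counts alive _ hcnt _ k hk; simpa using hcnt k hk
  | succ f ih =>
    intro i counts alive hlen hcnt halive k hk
    have hm : 0 ≤ m := by omega
    by_cases hempty : alive = []
    · -- loop exits early: no column is still alive, so counts never change again
      have hdead : hashWhileF i board m (k : Int) 0 ≠ (i : Int) := by
        intro habs
        have hmem : (k : Int) ∈ alive := by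
          rw [halive, List.mem_filter]
          refine ⟨?_, by simpa using habs⟩
          rw [PySem.List.mem_pyRange_one]
          omega
        simp [hempty] at hmem
      rw [show altRowLoop (f + 1) board m (counts, alive) (i : Int) = (counts, alive) by
        simp [altRowLoop, hempty]]
      rw [hcnt k hk, hashWhileF_stable board m (k : Int) i (f + 1) 0 (by simpa using hdead)]
    · -- one more row: filter the alive columns, bump their counts
      have hunfold : altRowLoop (f + 1) board m (counts, alive) (i : Int) =
          altRowLoop f board m
            ((alive.filter (altPred board m (i : Int))).foldl
               (fun cs j => cs.set j.toNat ((i : Int) + 1)) counts,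
             alive.filter (altPred board m (i : Int))) ((i : Int) + 1) := by
        simp [altRowLoop, hempty]
      -- characterise the new alive list
      have halive' : alive.filter (altPred board m (i : Int)) =
          (PySem.List.pyRange 0 m 1).filter
            (fun j => decide (hashWhileF (i + 1) board m j 0 = (i : Int) + 1)) := by
        rw [halive, List.filter_filter]
        apply List.filter_congr
        intro j hjr
        rw [PySem.List.mem_pyRange_one] at hjr
        have hsucc := hashWhileF_succ board m j hm hjr.1 i 0 le_rfl
        simp only [zero_add] at hsucc
        have hle := hashWhileF_le board m j i 0
        simp only [zero_add] at hle
        have key : (hashWhileF (i + 1) board m j 0 = (i : Int) + 1) ↔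
            (hashWhileF i board m j 0 = (i : Int) ∧
              ((i : Int) * m + j < (board.length : Int) ∧
                PySem.List.pyGet? board ((i : Int) * m + j) = some 1)) := by
          rw [hsucc]
          by_cases hP : altPred board m (i : Int) j = true
          · have hPP := hP
            simp only [altPred, decide_eq_true_eq] at hPP
            by_cases hrun : hashWhileF i board m j 0 = (i : Int)
            · rw [if_pos ⟨hP, hrun⟩]
              simp [hrun, hPP]
            · rw [if_neg (fun hc => hrun hc.2)]
              constructor
              · intro h; exact absurd h (by omega)
              · rintro ⟨h1, -⟩; exact absurd h1 hrun
          · have hPP : ¬((i : Int) * m + j < (board.length : Int) ∧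
                PySem.List.pyGet? board ((i : Int) * m + j) = some 1) := by
              intro hx
              exact hP (by simp only [altPred, decide_eq_true_eq]; exact hx)
            rw [if_neg (fun hc => hP hc.1)]
            constructor
            · intro h; exact absurd h (by omega)
            · rintro ⟨-, h2⟩; exact absurd h2 hPP
        rw [Bool.eq_iff_iff]
        simp only [Bool.and_eq_true, decide_eq_true_eq, altPred]
        tauto
      -- characterise the new counts
      have hlen' : ((alive.filter (altPred board m (i : Int))).foldl
          (fun cs j => cs.set j.toNat ((i : Int) + 1)) counts).length = m.toNat := by
        rw [foldl_set_length, hlen]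
      have hcnt' : ∀ k' : Nat, k' < m.toNat →
          ((alive.filter (altPred board m (i : Int))).foldl
              (fun cs j => cs.set j.toNat ((i : Int) + 1)) counts)[k']? =
            some (hashWhileF (i + 1) board m (k' : Int) 0) := by
        intro k' hk'
        rw [foldl_set_get]
        have hmemiff : k' ∈ (alive.filter (altPred board m (i : Int))).map Int.toNat ↔
            hashWhileF (i + 1) board m (k' : Int) 0 = (i : Int) + 1 := by
          rw [halive']
          constructor
          · intro hmem
            rcases List.mem_map.mp hmem with ⟨j, hjmem, hjk⟩
            rw [List.mem_filter] at hjmem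
            obtain ⟨hjr, hjd⟩ := hjmem
            rw [PySem.List.mem_pyRange_one] at hjr
            have hj0 : j = (k' : Int) := by omega
            rw [hj0] at hjd
            simpa using hjd
          · intro hval
            refine List.mem_map.mpr ⟨(k' : Int), ?_, by simp⟩
            rw [List.mem_filter]
            refine ⟨?_, by simpa using hval⟩
            rw [PySem.List.mem_pyRange_one]
            omega
        by_cases hmem : k' ∈ (alive.filter (altPred board m (i : Int))).map Int.toNat
        · rw [if_pos hmem, if_pos (by omega : k' < counts.length), hmemiff.mp hmem]
        · rw [if_neg hmem, hcnt k' hk']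
          have hsucc := hashWhileF_succ board m (k' : Int) hm (by positivity) i 0 le_rfl
          simp only [zero_add] at hsucc
          have hne := (not_iff_not.mpr hmemiff).mp hmem
          rw [hsucc, if_neg]
          intro hcond
          exact hne (by rw [hsucc, if_pos hcond])
      have hrest := ih (i + 1)
        ((alive.filter (altPred board m (i : Int))).foldl
            (fun cs j => cs.set j.toNat ((i : Int) + 1)) counts)
        (alive.filter (altPred board m (i : Int)))
        hlen' hcnt'
        (by
          rw [halive']
          apply List.filter_congr
          intro j _
          rw [decide_eq_decide]
          push_cast
          rfl)
        k hk
      have hidx : ((i + 1 : Nat) : Int) = (i : Int) + 1 := by push_cast; ring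
      rw [hidx] at hrest
      rw [hunfold, show i + (f + 1) = (i + 1) + f from by omega]
      exact hrest

-- A's running sum over range(m) equals a power sum
lemma sum_side (f : Int → Int) (n m : Int) :
    List.foldl (fun h j => h + f j * n ^ j.toNat) 0 (PySem.List.pyRange 0 m 1)
      = (List.map (fun k : Nat => f k * n ^ k) (List.range m.toNat)).sum := by
  rw [PySem.List.foldl_add _ (fun j => f j * n ^ j.toNat)]
  rw [PySem.List.pyRange_one]
  simp [List.map_map, Function.comp_def]

-- B's (key, p) accumulator pair computed in closed form
lemma fold_pair (n : Int) (g : Nat → Int) :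
    ∀ (a : Nat) (k0 p0 : Int),
      (List.range a).foldl (fun (kp : Int × Int) jn => (kp.1 + g jn * kp.2, kp.2 * n)) (k0, p0)
        = (k0 + ((List.range a).map (fun jn => g jn * (p0 * n ^ jn))).sum, p0 * n ^ a) := by
  intro a
  induction a with
  | zero => intro k0 p0; simp
  | succ a ih =>
    intro k0 p0
    rw [List.range_succ, List.foldl_append, ih]
    simp only [List.foldl_cons, List.foldl_nil, List.map_append, List.sum_append,
      List.map_cons, List.map_nil, List.sum_cons, List.sum_nil]
    simp only [Prod.mk.injEq]
    constructor <;> ring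

-- B's final loop over a counts array whose entries are known
lemma alt_final (n m : Int) (cs : List Int) (g : Int → Int)
    (hg : ∀ k : Nat, k < m.toNat → PySem.List.pyGetD cs ((k : Nat) : Int) 0 = g ((k : Nat) : Int)) :
    ((PySem.List.pyRange 0 m 1).foldl
        (fun kp j => (kp.1 + PySem.List.pyGetD cs j 0 * kp.2, kp.2 * n)) ((0 : Int), (1 : Int))).1
      = (List.map (fun k : Nat => g ((k : Nat) : Int) * n ^ k) (List.range m.toNat)).sum := by
  rw [PySem.List.pyRange_one]
  simp only [Int.sub_zero, List.foldl_map]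
  rw [fold_pair n (fun jn => PySem.List.pyGetD cs (0 + (jn : Int)) 0) m.toNat 0 1]
  simp only [zero_add, one_mul]
  congr 1
  apply List.map_congr_left
  intro k hkr
  rw [List.mem_range] at hkr
  rw [hg k hkr]

lemma main_eq (board : List Int) (n m : Int) :
    hash_board board n m = hash_board_alt board n m := by
  have hbase := rowLoop_inv board m n.toNat 0 (List.replicate m.toNat 0) (PySem.List.pyRange 0 m 1)
      (by simp)
      (by intro k hk; simp [hk, hashWhileF])
      (by
        rw [eq_comm, List.filter_eq_self]
        intro j _
        simp [hashWhileF])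
  have hcnt : ∀ k : Nat, k < m.toNat →
      (altRowLoop n.toNat board m (List.replicate m.toNat 0, PySem.List.pyRange 0 m 1) 0).1[k]? =
        some (hashWhileF n.toNat board m (k : Int) 0) := by
    intro k hk
    simpa using hbase k hk
  unfold hash_board hash_board_alt
  rw [sum_side (fun j => hashWhileF n.toNat board m j 0) n m]
  rw [alt_final n m _ (fun j => hashWhileF n.toNat board m j 0) (fun k hk => by
    rw [PySem.List.pyGetD_natCast, List.getD_eq_getElem?_getD, hcnt k hk]
    rfl)]

-- ===== VERDICT (by name: the statement is the Claim_ definition above) =====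
theorem hash_board_spec : Claim_equal_hash_board := by
  intro board n m _ _
  unfold Spec_hash_board
  exact main_eq board n m
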